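-- pv_equiv track=rewrite | github.com/hkneiding/tmQMg-L | stages/1-extraction/chem.py | get_stoichiometry
-- ===== SOURCE A (Python) =====
-- def get_stoichiometry(xyz: str):
--
--     """Gets the stoichiometry string for a given xyz structure.
--
--     Arguments:
--         xyz (str): The xyz structure.
--
--     Returns:
--         str: The stoichiometry string.
--     """
--
--     lines = xyz.strip().split('\n')
--
--     # count elements in xyz
--     element_counts = {}
--     for i in range(2, len(lines)):
--         element = lines[i].split(' ')[0]
--         if element in element_counts.keys():
--             element_counts[element] += 1
--         else:
--             element_counts[element] = 1
--
--     # setup chemical formula string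
--     stoichiometry = ''
--     for key in sorted(element_counts.keys()):
--
--         if key == 'H' or key == 'C':
--             continue
--
--         stoichiometry += key
--         if element_counts[key] > 1:
--             stoichiometry += str(element_counts[key])
--
--     for key in ['H', 'C']:
--         if key in element_counts.keys():
--             if element_counts[key] > 1:
--                 stoichiometry = str(element_counts[key]) + stoichiometry
--             stoichiometry = key + stoichiometry
--
--     return stoichiometry
-- ===== SOURCE B (Python) =====
-- def get_stoichiometry(xyz: str):
--
--     """Gets the stoichiometry string for a given xyz structure.
--
--     Arguments:
--         xyz (str): The xyz structure.
--
--     Returns: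
--         str: The stoichiometry string.
--     """
--
--     lines = xyz.strip().split('\n')
--
--     # sort the element tokens themselves into Hill order (C, H, then alphabetical)
--     tokens = sorted((line.split(' ')[0] for line in lines[2:]),
--                     key=lambda e: (0, '') if e == 'C' else (1, '') if e == 'H' else (2, e))
--
--     # run-length encode the sorted token list
--     runs = []
--     for t in tokens:
--         if runs and runs[-1][0] == t:
--             runs[-1] = (t, runs[-1][1] + 1)
--         else:
--             runs.append((t, 1))
--
--     return ''.join(t + (str(c) if c > 1 else '') for t, c in runs)
-- ===== Notes on version B (the rewrite author's own statement) =====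
-- stated objective: alternative
-- what changed: B removes the counting dict entirely: it sorts the element tokens themselves by a Hill-order key (C, H, then alphabetical), run-length encodes the sorted token list into (symbol, count) runs in one pass, and joins the runs, whereas A counts into a dict and formats with an append loop over sorted keys plus a reverse-prepend loop for H and C.
import Mathlib
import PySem

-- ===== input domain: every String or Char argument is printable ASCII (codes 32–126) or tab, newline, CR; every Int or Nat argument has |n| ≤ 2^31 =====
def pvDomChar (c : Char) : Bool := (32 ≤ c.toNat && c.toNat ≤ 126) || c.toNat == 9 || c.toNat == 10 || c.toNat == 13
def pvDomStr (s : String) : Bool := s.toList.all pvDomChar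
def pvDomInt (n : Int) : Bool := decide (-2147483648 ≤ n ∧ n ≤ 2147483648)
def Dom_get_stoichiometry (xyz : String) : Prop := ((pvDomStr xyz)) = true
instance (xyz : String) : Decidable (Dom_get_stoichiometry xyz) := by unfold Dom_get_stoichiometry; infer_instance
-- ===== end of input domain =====

-- B replaces A's counting dict and two formatting loops by sorting the element tokens
-- themselves with a Hill-order key and run-length encoding the sorted token list.

-- shared helper: line.split(' ')[0]
def pvEl (line : String) : String := ((PySem.Str.split? line " ").getD []).headD ""

-- ===== PORT A =====
-- 'lines[i]' with i ∈ range(2, len(lines)) is always in range and line.split(' ') is never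
-- empty, so the defaults fed to pyGetD/getD/headD are never used; split? never returns none
-- since its separator is non-empty.
def get_stoichiometry (xyz : String) : String :=
  let lines := (PySem.Str.split? (PySem.Str.strip xyz) "\n").getD []
  let counts := (PySem.List.pyRange 2 (PySem.List.len lines)).foldl
    (fun d i =>
      let element := pvEl (PySem.List.pyGetD lines i "")
      if d.contains element then d.modify element 0 (· + 1)
      else d.insert element 1)
    PySem.Dict.empty
  let s1 := (PySem.List.sorted counts.keys id).foldl
    (fun s key =>
      if key == "H" || key == "C" then s
      else
        let s := s ++ key
        if counts.getD key 0 > 1 then s ++ PySem.Int.toStr (counts.getD key 0) else s)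
    ""
  (["H", "C"]).foldl
    (fun s key =>
      if counts.contains key then
        let s := if counts.getD key 0 > 1 then PySem.Int.toStr (counts.getD key 0) ++ s else s
        key ++ s
      else s)
    s1

-- ===== PORT B =====
-- B-side helpers: the two components of the Hill sort key (a Python tuple key, hence sorted2)
def pvK1 (e : String) : Int := if e == "C" then 0 else if e == "H" then 1 else 2
def pvK2 (e : String) : String := if e == "C" then "" else if e == "H" then "" else e
-- one step of the run-length-encoding loop over the sorted tokens
def pvStep (runs : List (String × Int)) (t : String) : List (String × Int) :=
  match runs.getLast? with
  | some p => if p.1 == t then runs.dropLast ++ [(t, p.2 + 1)] else runs ++ [(t, (1 : Int))]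
  | none => runs ++ [(t, 1)]

-- same never-used defaults as in port A (indices in range, non-empty separator)
def get_stoichiometry_alt (xyz : String) : String :=
  let lines := (PySem.Str.split? (PySem.Str.strip xyz) "\n").getD []
  let tokens := PySem.List.sorted2 ((PySem.List.slice lines (some 2) none).map pvEl) pvK1 pvK2
  let runs := tokens.foldl pvStep []
  PySem.Str.join "" (runs.map (fun p => p.1 ++ (if p.2 > 1 then PySem.Int.toStr p.2 else "")))

-- ===== PRECONDITION & SPEC =====
def Spec_get_stoichiometry (xyz : String) (out : String) : Prop := out = get_stoichiometry_alt xyz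
instance (xyz : String) (out : String) : Decidable (Spec_get_stoichiometry xyz out) := by unfold Spec_get_stoichiometry; infer_instance

-- ===== CLAIM (what is proved, stated in full; the proofs are below) =====
def Claim_equal_get_stoichiometry : Prop := ∀ (xyz : String), Dom_get_stoichiometry xyz → Spec_get_stoichiometry xyz (get_stoichiometry xyz)

-- ===== LEMMAS AND PROOFS =====

def pvKeep (k : String) : Bool := !(k == "H" || k == "C")

-- the element tokens of lines[2:]
def pvToks (lines : List String) : List String :=
  (PySem.List.slice lines (some 2) none).map pvEl

-- let-free restatements of the two port bodies (definitionally equal to the ports)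
def pvCA (lines : List String) : PySem.Dict String Int :=
  (PySem.List.pyRange 2 (PySem.List.len lines)).foldl
    (fun d i =>
      if d.contains (pvEl (PySem.List.pyGetD lines i "")) then
        d.modify (pvEl (PySem.List.pyGetD lines i "")) 0 (· + 1)
      else d.insert (pvEl (PySem.List.pyGetD lines i "")) 1)
    PySem.Dict.empty

def pvA (lines : List String) : String :=
  (["H", "C"]).foldl
    (fun s key =>
      if (pvCA lines).contains key then
        key ++ (if (pvCA lines).getD key 0 > 1 then
          PySem.Int.toStr ((pvCA lines).getD key 0) ++ s else s)
      else s)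
    ((PySem.List.sorted (pvCA lines).keys id).foldl
      (fun s key =>
        if key == "H" || key == "C" then s
        else if (pvCA lines).getD key 0 > 1 then
          (s ++ key) ++ PySem.Int.toStr ((pvCA lines).getD key 0)
        else s ++ key)
      "")

def pvB (lines : List String) : String :=
  PySem.Str.join ""
    (((PySem.List.sorted2 (pvToks lines) pvK1 pvK2).foldl pvStep []).map
      (fun p => p.1 ++ (if p.2 > 1 then PySem.Int.toStr p.2 else "")))

-- the Hill-ordered list of distinct element symbols, and the counter dict
def pvOrder (toks : List String) : List String :=
  (["C", "H"].filter (fun e => toks.contains e)) ++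
    PySem.List.sorted ((PySem.Set.ofList toks).filter pvKeep) id

-- the midpoint both proofs aim at: format each element of the Hill order once
def pvMid (toks : List String) : String :=
  PySem.Str.join "" ((pvOrder toks).map
    (fun k => k ++ (if ((toks.count k : Int)) > 1 then PySem.Int.toStr (toks.count k) else "")))

-- ---------- A-side: pvA = pvMid ----------

-- A's counting step (contains-test, then modify or insert 1) equals the counter step.
theorem pv_countStep_eq (d : PySem.Dict String Int) (el : String) :
    (if d.contains el then d.modify el 0 (· + 1) else d.insert el 1)
      = d.insert el (d.getD el 0 + 1) := by
  cases h : d.contains el with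
  | true => simp [PySem.Dict.modify]
  | false => rw [if_neg (by simp), PySem.Dict.getD_of_not_contains d 0 h]; norm_num

theorem pv_counts_eq (lines : List String) :
    pvCA lines = PySem.Dict.counter (pvToks lines) := by
  unfold pvCA pvToks
  refine Eq.trans (PySem.List.foldl_pyRange_pyGetD lines ""
    (fun (d : PySem.Dict String Int) line =>
      if d.contains (pvEl line) then d.modify (pvEl line) 0 (· + 1)
      else d.insert (pvEl line) 1)
    PySem.Dict.empty (show (0 : Int) ≤ 2 by norm_num)) ?_
  rw [show PySem.List.slice lines (some 2) none = lines.drop 2 from by simp [pysem]]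
  rw [show (fun (d : PySem.Dict String Int) (line : String) =>
        if d.contains (pvEl line) then d.modify (pvEl line) 0 (· + 1)
        else d.insert (pvEl line) 1)
      = (fun d line => d.insert (pvEl line) (d.getD (pvEl line) 0 + 1)) from
    funext fun d => funext fun line => pv_countStep_eq d (pvEl line)]
  simp only [show ((2:Int)).toNat = 2 from rfl]
  rw [← List.foldl_map (f := pvEl)
    (g := fun (d : PySem.Dict String Int) x => d.insert x (d.getD x 0 + 1))]
  rw [PySem.Dict.foldl_insert_getD_add_one_eq_counter]

-- joining with the empty separator is flattening
theorem pv_join_nil_flatten (parts : List (List Char)) :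
    PySem.Chars.join [] parts = parts.flatten := by
  induction parts with
  | nil => simp [PySem.Chars.join_nil]
  | cons x t ih =>
    cases t with
    | nil => simp [PySem.Chars.join_singleton]
    | cons y t' => rw [PySem.Chars.join_cons_cons]; simp [ih]

-- the formatted chunk for one element
def pvFmt (counts : PySem.Dict String Int) (k : String) : List Char :=
  k.toList ++ (if counts.getD k 0 > 1 then PySem.Int.toChars (counts.getD k 0) else [])

-- characterisation of A's first formatting loop
theorem pv_loop1 (c : PySem.Dict String Int) (l : List String) (a : String) :
    (l.foldl
      (fun s key =>
        if key == "H" || key == "C" then s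
        else if c.getD key 0 > 1 then (s ++ key) ++ PySem.Int.toStr (c.getD key 0)
        else s ++ key)
      a).toList
    = a.toList ++ ((l.filter pvKeep).map (pvFmt c)).flatten := by
  induction l generalizing a with
  | nil => simp
  | cons k t ih =>
    simp only [List.foldl_cons, List.filter_cons]
    cases hk : (k == "H" || k == "C") with
    | true =>
      rw [if_pos (show (true = true) from rfl), ih,
        show pvKeep k = false from by simp [pvKeep, hk], if_neg (by simp)]
    | false =>
      rw [if_neg (show ¬(false = true) by simp),
        show pvKeep k = true from by simp [pvKeep, hk],
        if_pos (show (true = true) from rfl)]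
      by_cases hc : c.getD k 0 > 1
      · rw [if_pos hc, ih]
        simp [pvFmt, hc, String.toList_append, PySem.Int.toList_toStr, List.append_assoc]
      · rw [if_neg hc, ih]
        simp [pvFmt, hc, String.toList_append, List.append_assoc]

-- sorting commutes with filtering a duplicate-free list of strings
theorem pv_sorted_filter (K : List String) (hnd : K.Nodup) (p : String → Bool) :
    PySem.List.sorted (K.filter p) id = (PySem.List.sorted K id).filter p := by
  apply PySem.List.sorted_eq_of_perm_of_pairwise_lt
  · exact (PySem.List.sorted_perm K id false).filter p
  · have hle := PySem.List.sorted_pairwise K id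
    have hnd' : (PySem.List.sorted K id).Nodup :=
      ((PySem.List.sorted_perm K id false).nodup_iff).mpr hnd
    have hlt : (PySem.List.sorted K id).Pairwise (fun a b => a < b) :=
      (hle.and hnd').imp (fun h => lt_of_le_of_ne h.1 h.2)
    exact hlt.filter p

theorem pvA_eq_mid (lines : List String) : pvA lines = pvMid (pvToks lines) := by
  unfold pvA pvMid pvOrder
  rw [pv_counts_eq]
  set toks := pvToks lines with htoks
  have hnd : (PySem.Dict.counter toks).keys.Nodup := PySem.Dict.nodup_keys_counter toks
  set s1 := (PySem.List.sorted (PySem.Dict.counter toks).keys id).foldl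
      (fun s key =>
        if key == "H" || key == "C" then s
        else if (PySem.Dict.counter toks).getD key 0 > 1 then
          (s ++ key) ++ PySem.Int.toStr ((PySem.Dict.counter toks).getD key 0)
        else s ++ key)
      "" with hs1def
  have hs1 : s1.toList
      = (((PySem.List.sorted (PySem.Dict.counter toks).keys id).filter pvKeep).map
          (pvFmt (PySem.Dict.counter toks))).flatten := by
    rw [hs1def, pv_loop1, show ("" : String).toList = [] from rfl, List.nil_append]
  have hfmt : (String.toList ∘ fun k =>
        k ++ if 1 < toks.count k then PySem.Int.toStr ((toks.count k : Int)) else "")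
      = pvFmt (PySem.Dict.counter toks) := by
    funext k
    simp [pvFmt, String.toList_append, apply_ite String.toList, PySem.Int.toList_toStr,
      PySem.Dict.getD_counter, Nat.one_lt_cast, show ("" : String).toList = [] from rfl]
  have hkeys : (PySem.Dict.counter toks).keys = PySem.Set.ofList toks :=
    PySem.Dict.keys_counter toks
  have hsf : PySem.List.sorted ((PySem.Set.ofList toks).filter pvKeep) id
      = (PySem.List.sorted (PySem.Set.ofList toks) id).filter pvKeep :=
    pv_sorted_filter _ (PySem.Set.nodup_ofList toks) _
  rw [hkeys] at hs1
  apply String.ext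
  rw [PySem.Str.toList_join, show ("" : String).toList = [] from rfl, pv_join_nil_flatten]
  simp only [List.foldl_cons, List.foldl_nil, List.map_append, List.map_map,
    List.flatten_append, hsf, PySem.Dict.contains_counter, PySem.Dict.getD_counter]
  by_cases hC : "C" ∈ toks <;>
    by_cases hH : "H" ∈ toks <;>
      by_cases hcC : 1 < toks.count "C" <;>
        by_cases hcH : 1 < toks.count "H" <;>
          simp [hC, hH, hcC, hcH, hfmt, hs1, pvFmt, String.toList_append, Nat.one_lt_cast,
            PySem.Int.toList_toStr, PySem.Dict.getD_counter, List.append_assoc]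

-- ---------- B-side: pvB = pvMid ----------

-- the combined (lexicographic) Hill key
def pvHK (e : String) : Int ×ₗ String := toLex (pvK1 e, pvK2 e)

theorem pvHK_inj : Function.Injective pvHK := by
  intro a b h
  have h' : (pvK1 a, pvK2 a) = (pvK1 b, pvK2 b) := congrArg ofLex h
  have h1 : pvK1 a = pvK1 b := congrArg Prod.fst h'
  have h2 : pvK2 a = pvK2 b := congrArg Prod.snd h'
  unfold pvK1 at h1
  unfold pvK2 at h2
  split_ifs at h1 h2 with hac hbc hbh hah hbc' hbh' <;> simp_all

-- sorted2 with the two key components is sorting by the lexicographic key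
theorem pv_sorted2_eq (xs : List String) :
    PySem.List.sorted2 xs pvK1 pvK2 = PySem.List.sorted xs pvHK := by
  rw [PySem.List.sorted_eq_foldl_insertBy]
  show xs.foldl (fun acc x => PySem.List.insertBy
      (fun a b => decide (pvK1 a < pvK1 b) || (!decide (pvK1 b < pvK1 a) && decide (pvK2 a < pvK2 b)))
      x acc) []
    = xs.foldl (fun acc x => PySem.List.insertBy (fun a b => decide (pvHK a < pvHK b)) x acc) []
  have hcmp : (fun (a b : String) => decide (pvK1 a < pvK1 b)
        || (!decide (pvK1 b < pvK1 a) && decide (pvK2 a < pvK2 b)))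
      = (fun a b => decide (pvHK a < pvHK b)) := by
    funext a b
    have hlex : pvHK a < pvHK b ↔ pvK1 a < pvK1 b ∨ (pvK1 a = pvK1 b ∧ pvK2 a < pvK2 b) :=
      Prod.Lex.lt_iff
    rcases lt_trichotomy (pvK1 a) (pvK1 b) with h | h | h
    · simp [hlex, h]
    · simp [hlex, h]
    · simp [hlex, h, not_lt_of_gt h, ne_of_gt h]
  rw [hcmp]

theorem pv_mem_order (toks : List String) (x : String) :
    x ∈ pvOrder toks ↔ x ∈ toks := by
  unfold pvOrder
  rw [List.mem_append, List.mem_filter,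
    (PySem.List.sorted_perm ((PySem.Set.ofList toks).filter pvKeep) id false).mem_iff,
    List.mem_filter, PySem.Set.mem_ofList]
  constructor
  · rintro (⟨_, h⟩ | ⟨h, _⟩)
    · simpa using h
    · exact h
  · intro hx
    by_cases hk : pvKeep x = true
    · exact Or.inr ⟨hx, hk⟩
    · simp only [pvKeep] at hk
      simp at hk
      have hx2 : x = "H" ∨ x = "C" := by
        by_cases hxh : x = "H"
        · exact Or.inl hxh
        · exact Or.inr (hk hxh)
      refine Or.inl ⟨?_, by simpa using hx⟩
      rcases hx2 with h | h <;> simp [h]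

theorem pv_order_nodup (toks : List String) : (pvOrder toks).Nodup := by
  unfold pvOrder
  refine List.Nodup.append ?_ ?_ ?_
  · exact List.Nodup.filter _ (by decide)
  · exact ((PySem.List.sorted_perm _ id false).nodup_iff).mpr
      (List.Nodup.filter _ (PySem.Set.nodup_ofList toks))
  · intro x hx hy
    have hx' : x ∈ ["C", "H"] := (List.mem_filter.mp hx).1
    have hy' : pvKeep x = true :=
      (List.mem_filter.mp ((PySem.List.sorted_perm _ id false).mem_iff.mp hy)).2
    simp only [pvKeep] at hy'
    simp at hx'
    rcases hx' with h | h <;> simp [h] at hy'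

-- the Hill order is strictly increasing under the lexicographic key
theorem pv_order_pairwise (toks : List String) :
    (pvOrder toks).Pairwise (fun a b => pvHK a < pvHK b) := by
  unfold pvOrder
  rw [List.pairwise_append]
  refine ⟨?_, ?_, ?_⟩
  · exact List.Pairwise.sublist List.filter_sublist (by decide)
  · have hnd : (PySem.List.sorted ((PySem.Set.ofList toks).filter pvKeep) id).Nodup :=
      ((PySem.List.sorted_perm _ id false).nodup_iff).mpr
        (List.Nodup.filter _ (PySem.Set.nodup_ofList toks))
    have hle := PySem.List.sorted_pairwise ((PySem.Set.ofList toks).filter pvKeep) id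
    have hlt : (PySem.List.sorted ((PySem.Set.ofList toks).filter pvKeep) id).Pairwise
        (fun a b => a < b) :=
      (hle.and hnd).imp (fun h => lt_of_le_of_ne h.1 h.2)
    refine List.Pairwise.imp_of_mem ?_ hlt
    intro a b ha hb hab
    have hka : pvKeep a = true :=
      (List.mem_filter.mp ((PySem.List.sorted_perm _ id false).mem_iff.mp ha)).2
    have hkb : pvKeep b = true :=
      (List.mem_filter.mp ((PySem.List.sorted_perm _ id false).mem_iff.mp hb)).2
    simp only [pvKeep] at hka hkb
    simp at hka hkb
    have ha2 : pvHK a = toLex (2, a) := by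
      unfold pvHK pvK1 pvK2
      simp [hka.2, hka.1]
    have hb2 : pvHK b = toLex (2, b) := by
      unfold pvHK pvK1 pvK2
      simp [hkb.2, hkb.1]
    rw [ha2, hb2]
    exact Prod.Lex.lt_iff.mpr (Or.inr ⟨rfl, hab⟩)
  · intro x hx y hy
    have hx' : x ∈ ["C", "H"] := (List.mem_filter.mp hx).1
    have hky : pvKeep y = true :=
      (List.mem_filter.mp ((PySem.List.sorted_perm _ id false).mem_iff.mp hy)).2
    simp only [pvKeep] at hky
    simp at hky
    have hy2 : pvHK y = toLex (2, y) := by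
      unfold pvHK pvK1 pvK2
      simp [hky.2, hky.1]
    have hx1 : pvK1 x ≤ 1 := by
      simp at hx'
      rcases hx' with h | h <;> simp [pvK1, h]
    rw [hy2]
    exact Prod.Lex.lt_iff.mpr (Or.inl (by
      show pvK1 x < (2 : Int)
      omega))

-- the sorted token list, written as Hill-ordered runs
def pvT (toks : List String) : List String :=
  (pvOrder toks).flatMap (fun k => List.replicate (toks.count k) k)

theorem pv_count_flatMap (n : String → Nat) (x : String) :
    ∀ (l : List String), l.Nodup →
      (l.flatMap (fun k => List.replicate (n k) k)).count x = if x ∈ l then n x else 0 := by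
  intro l
  induction l with
  | nil => simp
  | cons k rest ih =>
    intro hnd
    rw [List.nodup_cons] at hnd
    rw [List.flatMap_cons, List.count_append, List.count_replicate, ih hnd.2]
    by_cases hx : x = k
    · subst hx
      simp [hnd.1]
    · simp [hx, Ne.symm hx]

theorem pvT_perm (toks : List String) : (pvT toks).Perm toks := by
  rw [List.perm_iff_count]
  intro a
  unfold pvT
  rw [pv_count_flatMap _ a _ (pv_order_nodup toks)]
  by_cases ha : a ∈ toks
  · simp [(pv_mem_order toks a).mpr ha]
  · rw [if_neg (fun h => ha ((pv_mem_order toks a).mp h))]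
    exact (List.count_eq_zero.mpr ha).symm

theorem pv_pairwise_flatMap (n : String → Nat) :
    ∀ (l : List String), l.Pairwise (fun a b => pvHK a < pvHK b) →
      (l.flatMap (fun k => List.replicate (n k) k)).Pairwise (fun a b => pvHK a ≤ pvHK b) := by
  intro l
  induction l with
  | nil => simp
  | cons k rest ih =>
    intro h
    rw [List.pairwise_cons] at h
    rw [List.flatMap_cons, List.pairwise_append]
    refine ⟨List.pairwise_replicate.mpr (Or.inr (le_refl _)), ih h.2, ?_⟩
    intro x hx y hy
    have hx' : x = k := List.eq_of_mem_replicate hx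
    rw [List.mem_flatMap] at hy
    obtain ⟨k', hk', hy'⟩ := hy
    have hy2 : y = k' := List.eq_of_mem_replicate hy'
    rw [hx', hy2]
    exact le_of_lt (h.1 k' hk')

theorem pvT_pairwise (toks : List String) :
    (pvT toks).Pairwise (fun a b => pvHK a ≤ pvHK b) :=
  pv_pairwise_flatMap _ _ (pv_order_pairwise toks)

theorem pv_sorted_eq_T (toks : List String) :
    PySem.List.sorted toks pvHK = pvT toks := by
  refine PySem.List.eq_of_perm_of_pairwise_le_of_injective pvHK pvHK_inj
    ?_ (PySem.List.sorted_pairwise toks pvHK) (pvT_pairwise toks)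
  exact (PySem.List.sorted_perm toks pvHK false).trans (pvT_perm toks).symm

-- run-length encoding a single block of equal tokens
theorem pv_rle_block (k : String) (c : Int) :
    ∀ (m : Nat) (acc : List (String × Int)),
      (List.replicate m k).foldl pvStep (acc ++ [(k, c)]) = acc ++ [(k, c + m)] := by
  intro m
  induction m generalizing c with
  | zero => simp
  | succ m ih =>
    intro acc
    rw [List.replicate_succ, List.foldl_cons]
    have hstep : pvStep (acc ++ [(k, c)]) k = acc ++ [(k, c + 1)] := by
      unfold pvStep
      rw [List.getLast?_concat]
      simp
    rw [hstep, ih (c + 1)]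
    have : c + 1 + (m : Int) = c + ((m : Nat) + 1 : Nat) := by push_cast; ring
    rw [this]

-- run-length encoding block-sorted tokens yields one (symbol, count) pair per block
theorem pv_rle_flatMap (n : String → Nat) :
    ∀ (l : List String) (acc : List (String × Int)),
      (∀ k ∈ l, 1 ≤ n k) → l.Nodup →
      (∀ k ∈ l, ∀ p, acc.getLast? = some p → p.1 ≠ k) →
      (l.flatMap (fun k => List.replicate (n k) k)).foldl pvStep acc
        = acc ++ l.map (fun k => (k, (n k : Int))) := by
  intro l
  induction l with
  | nil => simp
  | cons k rest ih =>
    intro acc hpos hnd hlast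
    rw [List.nodup_cons] at hnd
    rw [List.flatMap_cons, List.foldl_append]
    obtain ⟨m, hm⟩ : ∃ m, n k = m + 1 :=
      ⟨n k - 1, by have := hpos k (List.mem_cons_self) ; omega⟩
    rw [hm, List.replicate_succ, List.foldl_cons]
    have hstep : pvStep acc k = acc ++ [(k, 1)] := by
      unfold pvStep
      cases hacc : acc.getLast? with
      | none => rfl
      | some p =>
        have : p.1 ≠ k := hlast k (List.mem_cons_self) p hacc
        simp [this]
    rw [hstep, pv_rle_block k 1 m, ih (acc ++ [(k, (1 : Int) + m)])
      (fun k' hk' => hpos k' (List.mem_cons_of_mem _ hk'))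
      hnd.2
      (fun k' hk' p hp => by
        rw [List.getLast?_concat] at hp
        cases hp
        intro h
        have hk'' : k ∈ rest := by
          have : k = k' := h
          rw [this]; exact hk'
        exact hnd.1 hk'')]
    simp only [hm, List.append_assoc, List.singleton_append, List.map_cons]
    push_cast
    ring_nf

theorem pvB_eq_mid (lines : List String) : pvB lines = pvMid (pvToks lines) := by
  unfold pvB pvMid
  set toks := pvToks lines with htoks
  rw [pv_sorted2_eq, pv_sorted_eq_T]
  unfold pvT
  rw [pv_rle_flatMap (fun k => toks.count k) (pvOrder toks) []
    (fun k hk => List.count_pos_iff.mpr ((pv_mem_order toks k).mp hk))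
    (pv_order_nodup toks)
    (fun k _ p hp => by simp at hp)]
  rw [List.nil_append, List.map_map]
  rfl

-- ---------- assembly ----------

theorem pv_main (xyz : String) : get_stoichiometry xyz = get_stoichiometry_alt xyz := by
  have hA : get_stoichiometry xyz
      = pvA ((PySem.Str.split? (PySem.Str.strip xyz) "\n").getD []) := rfl
  have hB : get_stoichiometry_alt xyz
      = pvB ((PySem.Str.split? (PySem.Str.strip xyz) "\n").getD []) := rfl
  rw [hA, hB, pvA_eq_mid, pvB_eq_mid]

-- ===== VERDICT (by name: the statement is the Claim_ definition above) =====
theorem get_stoichiometry_spec : Claim_equal_get_stoichiometry := by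
  intro xyz _
  unfold Spec_get_stoichiometry
  exact pv_main xyz
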